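-- pv_equiv track=rewrite | github.com/SDRLurker/p2pcbot | dao.py | sub_query_from_dic
-- ===== SOURCE A (Python) =====
-- def sub_query_from_dic(from_dic, delimiter=","):
--     sub_query = ""
--     vlist = []
--     for key in from_dic:
--         fmt_str = "%s"
--         append_str = "%s%s = %s" % (delimiter, key, fmt_str)
--         if sub_query == "":
--             append_str = append_str[len(delimiter):]
--         sub_query += append_str
--         vlist.append(from_dic[key])
--     return sub_query, vlist
-- ===== SOURCE B (Python) =====
-- def sub_query_from_dic(from_dic, delimiter=","):
--     fragments = ["%s = %s" % (key, "%s") for key in from_dic]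
--     return delimiter.join(fragments), list(from_dic.values())
-- ===== Notes on version B (the rewrite author's own statement) =====
-- stated objective: simpler
-- what changed: Replaces the running string accumulator with its first-element empty-string guard and delimiter-prefix slicing by a collect-fragments-then-join decomposition, and builds the value list directly from the dict's values.
import Mathlib
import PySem

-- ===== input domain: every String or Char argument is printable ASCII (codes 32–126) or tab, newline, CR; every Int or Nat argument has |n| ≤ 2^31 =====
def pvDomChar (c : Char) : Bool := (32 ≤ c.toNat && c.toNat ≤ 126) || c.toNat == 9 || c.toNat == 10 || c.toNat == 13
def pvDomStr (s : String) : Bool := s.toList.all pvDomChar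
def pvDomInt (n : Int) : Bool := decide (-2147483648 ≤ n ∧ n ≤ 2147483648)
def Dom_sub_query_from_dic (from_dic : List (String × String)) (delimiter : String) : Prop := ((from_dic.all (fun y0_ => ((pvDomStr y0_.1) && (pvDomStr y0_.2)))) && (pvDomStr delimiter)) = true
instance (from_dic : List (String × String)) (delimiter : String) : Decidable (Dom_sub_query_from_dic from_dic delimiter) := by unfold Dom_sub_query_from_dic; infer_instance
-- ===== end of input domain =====

-- B replaces A's running string accumulator (with its first-element guard and
-- delimiter-prefix slicing) by a collect-fragments-then-join decomposition; simpler.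


-- ===== PORT A =====
-- "%s%s = %s" % (delimiter, key, fmt_str) is exactly string concatenation;
-- append_str[len(delimiter):] is a nonnegative slice, ported with PySem.Str.slice;
-- from_dic[key] is a dict lookup — key always comes from the dict itself, so get? is
-- always some and the .getD "" default is never used.
def sub_query_from_dic (from_dic : List (String × String)) (delimiter : String) : String × List String :=
  from_dic.foldl (fun st kv =>
    let fmt_str := "%s"
    let append_str := delimiter ++ kv.1 ++ " = " ++ fmt_str
    let append_str := if st.1 == "" then PySem.Str.slice append_str (some (PySem.Str.len delimiter)) none else append_str
    (st.1 ++ append_str, st.2 ++ [(PySem.Dict.get? (⟨from_dic⟩ : PySem.Dict String String) kv.1).getD ""]))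
    ("", [])

-- ===== PORT B =====
def sub_query_from_dic_alt (from_dic : List (String × String)) (delimiter : String) : String × List String :=
  let fragments := from_dic.map (fun kv => kv.1 ++ " = " ++ "%s")
  (PySem.Str.join delimiter fragments, from_dic.map Prod.snd)

-- ===== PRECONDITION & SPEC =====
-- Pre_ excludes association lists with duplicate keys: a Python dict cannot hold
-- duplicate keys, so such lists do not represent any input the Python programs see.
def Pre_sub_query_from_dic (from_dic : List (String × String)) (delimiter : String) : Prop :=
  (from_dic.map Prod.fst).Nodup
instance (from_dic : List (String × String)) (delimiter : String) : Decidable (Pre_sub_query_from_dic from_dic delimiter) := by unfold Pre_sub_query_from_dic; infer_instance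
def pvWitness_sub_query_from_dic : (List (String × String)) × String := ([("a", "1"), ("bb", "2")], ",")

def Spec_sub_query_from_dic (from_dic : List (String × String)) (delimiter : String) (out : String × List String) : Prop := out = sub_query_from_dic_alt from_dic delimiter
instance (from_dic : List (String × String)) (delimiter : String) (out : String × List String) : Decidable (Spec_sub_query_from_dic from_dic delimiter out) := by unfold Spec_sub_query_from_dic; infer_instance

-- ===== CLAIM (what is proved, stated in full; the proofs are below) =====
def Claim_equal_sub_query_from_dic : Prop := ∀ (from_dic : List (String × String)) (delimiter : String), Dom_sub_query_from_dic from_dic delimiter → Pre_sub_query_from_dic from_dic delimiter → Spec_sub_query_from_dic from_dic delimiter (sub_query_from_dic from_dic delimiter)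

-- ===== LEMMAS AND PROOFS =====

-- join of a nonempty list, unfolded to a flatten of delimiter-prefixed tails
theorem chars_join_cons (sep p : List Char) (ps : List (List Char)) :
    PySem.Chars.join sep (p :: ps) = p ++ (ps.map (fun q => sep ++ q)).flatten := by
  induction ps generalizing p with
  | nil => simp [PySem.Chars.join_singleton]
  | cons q rest ih =>
      rw [PySem.Chars.join_cons_cons, ih q]
      simp

-- under Nodup keys, the dict lookup of a pair's key returns that pair's value
theorem lookup_own (fd : List (String × String)) (kv : String × String)
    (hmem : kv ∈ fd) (hnd : (fd.map Prod.fst).Nodup) :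
    (PySem.Dict.get? (⟨fd⟩ : PySem.Dict String String) kv.1).getD "" = kv.2 := by
  have h : PySem.Dict.get? (⟨fd⟩ : PySem.Dict String String) kv.1 = some kv.2 := by
    rw [PySem.Dict.get?_eq_some_iff_mem_items]
    · exact hmem
    · exact hnd
  rw [h]; rfl

-- the loop after the first iteration: accumulator nonempty, so the branch never fires
theorem loop_inv (fd : List (String × String)) (delimiter : String)
    (rest : List (String × String)) (s : String) (v : List String)
    (hs : s.toList ≠ [])
    (hv : ∀ kv ∈ rest, (PySem.Dict.get? (⟨fd⟩ : PySem.Dict String String) kv.1).getD "" = kv.2) :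
    rest.foldl (fun st kv =>
      let fmt_str := "%s"
      let append_str := delimiter ++ kv.1 ++ " = " ++ fmt_str
      let append_str := if st.1 == "" then PySem.Str.slice append_str (some (PySem.Str.len delimiter)) none else append_str
      (st.1 ++ append_str, st.2 ++ [(PySem.Dict.get? (⟨fd⟩ : PySem.Dict String String) kv.1).getD ""]))
      (s, v)
    = (s ++ String.ofList ((rest.map (fun kv => delimiter.toList ++ kv.1.toList ++ (" = %s").toList)).flatten),
       v ++ rest.map Prod.snd) := by
  induction rest generalizing s v with
  | nil =>
      simp only [List.foldl_nil, List.map_nil, List.flatten_nil, List.map_nil, List.append_nil]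
      refine Prod.ext ?_ rfl
      apply String.toList_inj.mp; simp
  | cons kv rest ih =>
      simp only [List.foldl_cons]
      have hne : (s == "") = false := by
        apply beq_false_of_ne
        intro h; exact hs (by simp [h])
      rw [ih]
      · simp only [Prod.mk.injEq]
        refine ⟨?_, by simp [hv kv (by simp)]⟩
        apply String.toList_inj.mp
        simp [hne]
      · simp [hne]
      · intro kv' h; exact hv kv' (by simp [h])

-- ===== VERDICT (by name: the statement is the Claim_ definition above) =====
theorem sub_query_from_dic_spec : Claim_equal_sub_query_from_dic := by
  intro fd delimiter _ hpre
  unfold Spec_sub_query_from_dic sub_query_from_dic sub_query_from_dic_alt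
  cases fd with
  | nil =>
      simp
      apply String.toList_inj.mp
      simp [PySem.Str.toList_join, PySem.Chars.join_nil]
  | cons kv rest =>
      simp only [List.foldl_cons]
      have hv : ∀ kv' ∈ (kv :: rest), (PySem.Dict.get? (⟨kv :: rest⟩ : PySem.Dict String String) kv'.1).getD "" = kv'.2 :=
        fun kv' h => lookup_own (kv :: rest) kv' h hpre
      have hfirst : (("" : String) == "") = true := by decide
      simp only [hfirst, if_pos]
      rw [loop_inv (kv :: rest) delimiter rest]
      · simp only [Prod.mk.injEq]
        refine ⟨?_, by simp [hv kv (by simp)]⟩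
        apply String.toList_inj.mp
        simp [PySem.Str.toList_join, chars_join_cons, Function.comp_def]
      · simp
      · intro kv' h; exact hv kv' (by simp [h])
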